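-- pv_equiv track=rewrite | github.com/Codium-ai/cover-agent | cover_agent/lsp_logic/multilspy/multilspy_utils.py | get_index_from_line_col
-- ===== SOURCE A (Python) =====
-- def get_index_from_line_col(text: str, line: int, col: int) -> int:
--     """
--     Returns the index of the given zero-indexed line and column number in the given text
--     """
--     idx = 0
--     while line > 0:
--         assert idx < len(text), (idx, len(text), text)
--         if text[idx] == "\n":
--             line -= 1
--         idx += 1
--     idx += col
--     return idx
-- ===== SOURCE B (Python) =====
-- def get_index_from_line_col(text: str, line: int, col: int) -> int:
--     """
--     Returns the index of the given zero-indexed line and column number in the given text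
--     """
--     idx = 0
--     for _ in range(line):
--         pos = text.find("\n", idx)
--         assert pos != -1, (len(text), len(text), text)
--         idx = pos + 1
--     return idx + col
-- ===== Notes on version B (the rewrite author's own statement) =====
-- stated objective: idiomatic
-- what changed: B jumps from newline to newline with str.find inside a for-loop over range(line) (one iteration per line), instead of A's while-loop scanning and testing every single character.
import Mathlib
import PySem

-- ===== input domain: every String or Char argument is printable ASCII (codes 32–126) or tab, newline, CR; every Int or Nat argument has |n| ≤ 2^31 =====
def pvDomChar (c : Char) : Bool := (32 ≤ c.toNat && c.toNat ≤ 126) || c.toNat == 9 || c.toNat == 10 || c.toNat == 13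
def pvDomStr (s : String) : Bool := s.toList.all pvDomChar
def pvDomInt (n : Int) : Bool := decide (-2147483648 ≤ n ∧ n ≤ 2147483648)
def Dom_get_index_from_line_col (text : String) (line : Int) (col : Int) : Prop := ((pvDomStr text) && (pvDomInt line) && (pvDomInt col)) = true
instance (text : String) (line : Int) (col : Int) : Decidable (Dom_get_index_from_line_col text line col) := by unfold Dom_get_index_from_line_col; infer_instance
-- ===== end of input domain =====

-- B replaces A's per-character while-loop with one str.find jump per line (objective: idiomatic;
-- same return value wherever A returns).

-- ===== PORT A =====
-- A's while-loop: idx always equals the number of characters consumed, so scanning text[idx]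
-- is scanning the remaining suffix; the recursion carries that suffix plus (line, idx).
-- On cs = [] with line > 0 Python's assert raises (excluded by Pre_); the port returns idx there.
def pvGoA : List Char → Int → Int → Int
  | cs, line, idx =>
    if line > 0 then
      match cs with
      | [] => idx
      | c :: rest => pvGoA rest (if c = '\n' then line - 1 else line) (idx + 1)
    else idx

def get_index_from_line_col (text : String) (line : Int) (col : Int) : Int :=
  pvGoA text.toList line 0 + col

-- ===== PORT B =====
-- for _ in range(line): pos = text.find("\n", idx); assert pos != -1; idx = pos + 1
-- (the assert raises exactly when A's does; excluded by Pre_, the port just continues).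
def pvGoB (text : String) : Nat → Int → Int
  | 0, idx => idx
  | n + 1, idx => pvGoB text n (PySem.Str.findFrom text "\n" idx none + 1)

def get_index_from_line_col_alt (text : String) (line : Int) (col : Int) : Int :=
  pvGoB text line.toNat 0 + col

-- ===== PRECONDITION & SPEC =====
-- Pre_ excludes exactly the inputs where Python A (and B) raise AssertionError:
-- line is positive but text contains fewer than `line` newlines.
def Pre_get_index_from_line_col (text : String) (line : Int) (col : Int) : Prop :=
  line ≤ 0 ∨ line ≤ (text.toList.count '\n' : Int)

instance (text : String) (line : Int) (col : Int) : Decidable (Pre_get_index_from_line_col text line col) := by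
  unfold Pre_get_index_from_line_col; infer_instance

def pvWitness_get_index_from_line_col : String × Int × Int := ("ab\ncd\n", 2, 1)

def Spec_get_index_from_line_col (text : String) (line : Int) (col : Int) (out : Int) : Prop :=
  out = get_index_from_line_col_alt text line col

instance (text : String) (line : Int) (col : Int) (out : Int) : Decidable (Spec_get_index_from_line_col text line col out) := by
  unfold Spec_get_index_from_line_col; infer_instance

-- ===== CLAIM =====
def Claim_equal_get_index_from_line_col : Prop :=
  ∀ (text : String) (line : Int) (col : Int),
    Dom_get_index_from_line_col text line col →
    Pre_get_index_from_line_col text line col →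
    Spec_get_index_from_line_col text line col (get_index_from_line_col text line col)

-- ===== LEMMAS AND PROOFS =====

-- A's index accumulator just shifts the result.
theorem pvGoA_shift (cs : List Char) : ∀ (line idx : Int),
    pvGoA cs line idx = idx + pvGoA cs line 0 := by
  induction cs with
  | nil => intro line idx; by_cases h : line > 0 <;> simp [pvGoA, h]
  | cons c rest ih =>
    intro line idx
    by_cases h : line > 0
    · simp only [pvGoA, if_pos h]
      rw [ih _ (idx + 1), ih _ (0 + 1)]; ring
    · simp [pvGoA, h]

-- consuming one whole line: us is newline-free, then a '\n', then vs
theorem pvGoA_line (n : Int) (hn : 0 ≤ n) : ∀ (us vs : List Char), '\n' ∉ us →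
    pvGoA (us ++ '\n' :: vs) (n + 1) 0 = (us.length : Int) + 1 + pvGoA vs n 0 := by
  intro us
  induction us with
  | nil =>
    intro vs _
    have h1 : (n : Int) + 1 > 0 := by omega
    simp only [List.nil_append, pvGoA, if_pos h1]
    rw [pvGoA_shift]
    simp
  | cons u us ih =>
    intro vs hmem
    have hu : u ≠ '\n' := by intro h; exact hmem (h ▸ List.mem_cons_self ..)
    have h1 : (n : Int) + 1 > 0 := by omega
    simp only [List.cons_append, pvGoA, if_pos h1, if_neg hu]
    rw [pvGoA_shift, ih vs (fun h => hmem (List.mem_cons_of_mem _ h))]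
    simp; ring

theorem pvGoA_zero (cs : List Char) : pvGoA cs 0 0 = 0 := by
  cases cs <;> simp [pvGoA]


theorem pvGoA_nonpos (cs : List Char) (line : Int) (h : ¬ line > 0) : pvGoA cs line 0 = 0 := by
  cases cs <;> simp [pvGoA, h]

-- Main invariant: B's find-jump loop from position idx computes idx plus A's scan of the suffix.
theorem pvMain (n : Nat) : ∀ (text : String) (idx : Nat), idx ≤ text.toList.length →
    (n : Int) ≤ ((text.toList.drop idx).count '\n' : Int) →
    pvGoB text n (idx : Int) = (idx : Int) + pvGoA (text.toList.drop idx) (n : Int) 0 := by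
  induction n with
  | zero =>
    intro text idx _ _
    simp [pvGoB, pvGoA_zero]
  | succ n ih =>
    intro text idx hlen hcnt
    set cs := text.toList with hcs
    set ds := cs.drop idx with hds
    have hmem : '\n' ∈ ds := by
      have h1 : 0 < ds.count '\n' := by push_cast at hcnt; omega
      exact List.count_pos_iff.mp h1
    have hinf : ['\n'] <:+: ds := by
      obtain ⟨s, t, hst⟩ := List.append_of_mem hmem
      exact ⟨s, t, by simp [hst]⟩
    have hfind : PySem.Chars.find ds ['\n'] ≠ -1 := (PySem.Chars.find_ne_neg_one_iff _ _).2 hinf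
    set j := PySem.Chars.find ds ['\n'] with hj
    have hj0 : 0 ≤ j := (PySem.Chars.find_nonneg_iff _ _).2 hinf
    obtain ⟨hpre, hmin⟩ := PySem.Chars.find_spec (s := ds) (sub := ['\n']) hj0
    set J := j.toNat with hJ
    have hJlt : J < ds.length := by
      by_contra h
      rw [List.drop_eq_nil_of_le (by omega)] at hpre
      simp at hpre
    have hhead : ds.drop J = '\n' :: ds.drop (J + 1) := by
      obtain ⟨t, ht⟩ := hpre
      have hT : t = ds.drop (J + 1) := by
        have h2 := congrArg (List.drop 1) ht
        simpa [List.drop_drop, Nat.add_comm] using h2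
      rw [← ht, hT]
      rfl
    have hnotin : '\n' ∉ ds.take J := by
      intro hm
      obtain ⟨i, hi, hget⟩ := List.mem_take_iff_getElem.1 hm
      have hiJ : i < J := by omega
      apply hmin i hiJ
      have : ds.drop i = '\n' :: ds.drop (i + 1) := by
        rw [List.drop_eq_getElem_cons (by omega)]
        simp [hget]
      rw [this]
      exact ⟨_, rfl⟩
    have hdecomp : ds = ds.take J ++ '\n' :: ds.drop (J + 1) := by
      conv_lhs => rw [← List.take_append_drop J ds, hhead]
    -- B takes one step
    have hstep : pvGoB text (n + 1) (idx : Int) = pvGoB text n ((idx + J + 1 : Nat) : Int) := by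
      show pvGoB text n (PySem.Str.findFrom text "\n" (idx : Int) none + 1) = _
      have hff : PySem.Chars.findFrom cs ['\n'] (idx : Int) none = (idx : Int) + j := by
        rw [PySem.Chars.findFrom_natCast cs ['\n'] idx hlen]
        simp [← hds, ← hj, hfind]
      have : PySem.Str.findFrom text "\n" (idx : Int) none = (idx : Int) + j := by
        simpa [hcs] using hff
      rw [this]
      congr 1
      push_cast [hJ]
      omega
    rw [hstep, ih text (idx + J + 1) (by
      have hclen : cs.length = text.toList.length := rfl
      have hdlen : idx + ds.length = cs.length := by simp [hds]; omega
      omega) ?hc]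
    case hc =>
      have hcnt' : ds.count '\n' = (ds.take J).count '\n' + 1 + (ds.drop (J+1)).count '\n' := by
        conv_lhs => rw [hdecomp]
        simp [List.count_append]
        omega
      have h0 : (ds.take J).count '\n' = 0 := List.count_eq_zero.2 hnotin
      have : cs.drop (idx + J + 1) = ds.drop (J + 1) := by
        rw [hds, List.drop_drop]; ring_nf
      rw [this]
      rw [h0] at hcnt'
      push_cast at hcnt ⊢
      omega
    -- A side
    have hlineA : pvGoA ds ((n : Int) + 1) 0 = ((ds.take J).length : Int) + 1 + pvGoA (ds.drop (J+1)) (n : Int) 0 := by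
      conv_lhs => rw [hdecomp]
      exact pvGoA_line (n : Int) (by positivity) _ _ hnotin
    have hTake : ((ds.take J).length : Int) = (J : Int) := by simp; omega
    have : cs.drop (idx + J + 1) = ds.drop (J + 1) := by
      rw [hds, List.drop_drop]; ring_nf
    rw [this]
    push_cast
    rw [hlineA, hTake]
    ring


-- ===== VERDICT =====
theorem get_index_from_line_col_spec : Claim_equal_get_index_from_line_col := by
  intro text line col _ hpre
  unfold Spec_get_index_from_line_col get_index_from_line_col get_index_from_line_col_alt
  by_cases h : line > 0
  · have hcnt : line ≤ (text.toList.count '\n' : Int) := by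
      rcases hpre with h' | h'
      · omega
      · exact h'
    have hn : ((line.toNat : Nat) : Int) = line := Int.toNat_of_nonneg (by omega)
    have := pvMain line.toNat text 0 (by simp) (by simpa [hn] using hcnt)
    simp only [Nat.cast_zero, List.drop_zero, hn] at this
    rw [this]
    ring
  · have : line.toNat = 0 := Int.toNat_of_nonpos (by omega)
    rw [this]
    simp [pvGoB, pvGoA_nonpos _ _ h]
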